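-- pv_equiv track=rewrite | github.com/h0axyboi/practice-scripts | competitive coding/max_arithmetic.py | max_arith
-- ===== SOURCE A (Python) =====
-- def minimize(ma1,mi1,ma2,mi2,op):
--     if op=='+':
--         return mi1+mi2
--     elif op=='-':
--         return mi1-ma2
--     elif op=='*':
--         return mi1*mi2
--
-- def maximize(ma1,mi1,ma2,mi2,op):
--     if op=='+':
--         return ma1+ma2
--     elif op=='-':
--         return ma1-mi2
--     elif op=='*':
--         return ma1*ma2
--
-- def get_max(nums,oper,i,j,maxi,mini):
--     if i==j:
--         return nums[i]
--     ma=maximize(maxi[i][i],mini[i][i],maxi[i+1][j],mini[i+1][j],oper[i])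
--     for x in range(i,j):
--          ma=max(ma,maximize(maxi[i][x],mini[i][x],maxi[x+1][j],mini[x+1][j],oper[x]))
--     return ma
--
-- def get_min(nums,oper,i,j,maxi,mini):
--     if i==j:
--         return nums[i]
--     mi=minimize(maxi[i][i],mini[i][i],maxi[i+1][j],mini[i+1][j],oper[i])
--     for x in range(i,j):
--         mi=min(mi,minimize(maxi[i][x],mini[i][x],maxi[x+1][j],mini[x+1][j],oper[x]))
--     return mi
--
-- def max_arith(nums,oper):
--     maxi=[[0 for i in range(len(nums))] for j in range(len(nums))]
--     mini=[[0 for i in range(len(nums))] for j in range(len(nums))]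
--     for s in range(len(nums)):
--         for i in range(len(nums)-s):
--             j=i+s
--             maxi[i][j]=get_max(nums,oper,i,j,maxi,mini)
--             mini[i][j]=get_min(nums,oper,i,j,maxi,mini)
--     return maxi[0][len(nums)-1]
-- ===== SOURCE B (Python) =====
-- def max_arith(nums, oper):
--     # top-down memoized recursion: solve(i, j) = (max, min) achievable over operands i..j
--     memo = {}
--
--     def solve(i, j):
--         if (i, j) in memo:
--             return memo[(i, j)]
--         if i == j:
--             res = (nums[i], nums[i])
--         else:
--             best_ma = None
--             best_mi = None
--             for x in range(i, j):
--                 ma1, mi1 = solve(i, x)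
--                 ma2, mi2 = solve(x + 1, j)
--                 op = oper[x]
--                 if op == '+':
--                     ca, ci = ma1 + ma2, mi1 + mi2
--                 elif op == '-':
--                     ca, ci = ma1 - mi2, mi1 - ma2
--                 else:  # op == '*'
--                     ca, ci = ma1 * ma2, mi1 * mi2
--                 if best_ma is None or ca > best_ma:
--                     best_ma = ca
--                 if best_mi is None or ci < best_mi:
--                     best_mi = ci
--             res = (best_ma, best_mi)
--         memo[(i, j)] = res
--         return res
--
--     return solve(0, len(nums) - 1)[0]
-- ===== Notes on version B (the rewrite author's own statement) =====
-- stated objective: alternative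
-- what changed: bottom-up table-filling interval DP replaced by top-down memoized recursion: solve(i,j) returns the (max,min) pair for operands i..j, cached in a dict, instead of filling two n-by-n lists diagonal by diagonal with get_max/get_min helpers
import Mathlib
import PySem

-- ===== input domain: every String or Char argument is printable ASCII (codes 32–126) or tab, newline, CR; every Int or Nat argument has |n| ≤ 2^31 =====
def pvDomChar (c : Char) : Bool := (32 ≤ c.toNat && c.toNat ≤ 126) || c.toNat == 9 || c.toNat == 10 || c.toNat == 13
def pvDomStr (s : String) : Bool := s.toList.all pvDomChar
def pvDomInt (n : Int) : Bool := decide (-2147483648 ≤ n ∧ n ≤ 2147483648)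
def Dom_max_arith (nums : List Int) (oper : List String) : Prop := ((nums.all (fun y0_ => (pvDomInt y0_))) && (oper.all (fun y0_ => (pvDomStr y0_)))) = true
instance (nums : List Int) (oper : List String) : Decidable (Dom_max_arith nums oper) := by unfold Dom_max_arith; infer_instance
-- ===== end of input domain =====

-- B replaces A's bottom-up table-filling interval DP by a top-down memoized recursion
-- (solve(i,j) returning the (max,min) pair, cached in a dict): a different decomposition, same cost.


-- ===== PORT A =====
-- Python's maximize/minimize return None on an operator other than '+','-','*'; A then raises
-- (TypeError in max/min), so Pre_ excludes such inputs and the final `else 0` is never reached there.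
def maximizeA (ma1 mi1 ma2 mi2 : Int) (op : String) : Int :=
  if op = "+" then ma1 + ma2
  else if op = "-" then ma1 - mi2
  else if op = "*" then ma1 * ma2
  else 0

def minimizeA (ma1 mi1 ma2 mi2 : Int) (op : String) : Int :=
  if op = "+" then mi1 + mi2
  else if op = "-" then mi1 - ma2
  else if op = "*" then mi1 * mi2
  else 0

-- 2D table access/assignment: maxi[i][j] reads, maxi[i][j] = v writes. All indices A actually
-- uses are in range (diagonal order); out-of-range reads default to 0 / [] (unreachable under Pre_).
def tget (t : List (List Int)) (i j : Nat) : Int := (t.getD i []).getD j 0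
def tset (t : List (List Int)) (i j : Nat) (v : Int) : List (List Int) :=
  t.set i ((t.getD i []).set j v)

def get_maxA (nums : List Int) (oper : List String) (i j : Nat)
    (maxi mini : List (List Int)) : Int :=
  if i = j then nums.getD i 0
  else
    (List.range' i (j - i)).foldl
      (fun ma x =>
        max ma (maximizeA (tget maxi i x) (tget mini i x)
          (tget maxi (x + 1) j) (tget mini (x + 1) j) (oper.getD x "")))
      (maximizeA (tget maxi i i) (tget mini i i)
        (tget maxi (i + 1) j) (tget mini (i + 1) j) (oper.getD i ""))

def get_minA (nums : List Int) (oper : List String) (i j : Nat)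
    (maxi mini : List (List Int)) : Int :=
  if i = j then nums.getD i 0
  else
    (List.range' i (j - i)).foldl
      (fun mi x =>
        min mi (minimizeA (tget maxi i x) (tget mini i x)
          (tget maxi (x + 1) j) (tget mini (x + 1) j) (oper.getD x "")))
      (minimizeA (tget maxi i i) (tget mini i i)
        (tget maxi (i + 1) j) (tget mini (i + 1) j) (oper.getD i ""))

def max_arith (nums : List Int) (oper : List String) : Int :=
  let n := nums.length
  let st :=
    (List.range n).foldl
      (fun st s =>
        (List.range (n - s)).foldl
          (fun (st : List (List Int) × List (List Int)) i =>
            let j := i + s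
            let maxi' := tset st.1 i j (get_maxA nums oper i j st.1 st.2)
            let mini' := tset st.2 i j (get_minA nums oper i j maxi' st.2)
            (maxi', mini'))
          st)
      (List.replicate n (List.replicate n (0 : Int)),
       List.replicate n (List.replicate n (0 : Int)))
  tget st.1 0 (n - 1)

-- ===== PORT B =====
-- solve(i, j) from Source B: (max, min) for operands i..j, memoized in a dict; the running best_ma /
-- best_mi start as None (Option Int). Indices are Nat (Python's are nonnegative here); the final
-- `.getD 0` realises that res components are ints whenever the split loop ran (always under Pre_).
def solveB (nums : List Int) (oper : List String) (i j : Nat)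
    (memo : PySem.Dict (Nat × Nat) (Int × Int)) :
    (Int × Int) × PySem.Dict (Nat × Nat) (Int × Int) :=
  match memo.get? (i, j) with
  | some v => (v, memo)
  | none =>
    if i = j then
      let res := (nums.getD i 0, nums.getD i 0)
      (res, memo.insert (i, j) res)
    else
      let acc :=
        (List.range' i (j - i)).attach.foldl
          (fun (acc : Option Int × Option Int × PySem.Dict (Nat × Nat) (Int × Int)) xh =>
            let x := xh.1
            let r1 := solveB nums oper i x acc.2.2
            let r2 := solveB nums oper (x + 1) j r1.2
            let op := oper.getD x ""
            let ca := if op = "+" then r1.1.1 + r2.1.1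
                      else if op = "-" then r1.1.1 - r2.1.2
                      else r1.1.1 * r2.1.1
            let ci := if op = "+" then r1.1.2 + r2.1.2
                      else if op = "-" then r1.1.2 - r2.1.1
                      else r1.1.2 * r2.1.2
            let bma := match acc.1 with
                       | none => some ca
                       | some m => if ca > m then some ca else some m
            let bmi := match acc.2.1 with
                       | none => some ci
                       | some m => if ci < m then some ci else some m
            (bma, bmi, r2.2))
          (none, none, memo)
      let res := (acc.1.getD 0, acc.2.1.getD 0)
      (res, acc.2.2.insert (i, j) res)
termination_by j - i
decreasing_by
  all_goals try (have h := List.mem_range'_1.mp xh.2)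
  all_goals omega

def max_arith_alt (nums : List Int) (oper : List String) : Int :=
  (solveB nums oper 0 (nums.length - 1) PySem.Dict.empty).1.1

-- ===== PRECONDITION & SPEC =====
-- Pre_ excludes exactly the inputs where Python A raises: the empty operand list (IndexError on
-- maxi[0][-1]) and any input whose used operators oper[0..len(nums)-2] are missing (IndexError)
-- or not one of '+','-','*' (maximize returns None, then max(None, ...) raises TypeError).
def Pre_max_arith (nums : List Int) (oper : List String) : Prop :=
  nums ≠ [] ∧ ∀ x ∈ List.range (nums.length - 1),
    oper.getD x "" ∈ (["+", "-", "*"] : List String)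
instance (nums : List Int) (oper : List String) : Decidable (Pre_max_arith nums oper) := by
  unfold Pre_max_arith; infer_instance

def pvWitness_max_arith : List Int × List String := ([1, 2, 3], ["+", "*"])

def Spec_max_arith (nums : List Int) (oper : List String) (out : Int) : Prop := out = max_arith_alt nums oper
instance (nums : List Int) (oper : List String) (out : Int) : Decidable (Spec_max_arith nums oper out) := by unfold Spec_max_arith; infer_instance

-- ===== CLAIM (what is proved, stated in full; the proofs are below) =====
def Claim_equal_max_arith : Prop := ∀ (nums : List Int) (oper : List String), Dom_max_arith nums oper → Pre_max_arith nums oper → Spec_max_arith nums oper (max_arith nums oper)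

-- ===== LEMMAS AND PROOFS =====

-- The common mathematical recurrence both ports compute: F i j = (max, min) over operands i..j.
def F (nums : List Int) (oper : List String) (i j : Nat) : Int × Int :=
  if _h : j ≤ i then (nums.getD i 0, nums.getD i 0)
  else
    (List.range' i (j - i)).attach.foldl
      (fun (acc : Int × Int) xh =>
        let x := xh.1
        let p1 := F nums oper i x
        let p2 := F nums oper (x + 1) j
        (max acc.1 (maximizeA p1.1 p1.2 p2.1 p2.2 (oper.getD x "")),
         min acc.2 (minimizeA p1.1 p1.2 p2.1 p2.2 (oper.getD x ""))))
      (let p1 := F nums oper i i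
       let p2 := F nums oper (i + 1) j
       (maximizeA p1.1 p1.2 p2.1 p2.2 (oper.getD i ""),
        minimizeA p1.1 p1.2 p2.1 p2.2 (oper.getD i "")))
termination_by j - i
decreasing_by
  all_goals try (have h := List.mem_range'_1.mp xh.2)
  all_goals omega


-- combined (max, min) values of a split at x, expressed through F
def cmaxF (nums : List Int) (oper : List String) (i j x : Nat) : Int :=
  maximizeA (F nums oper i x).1 (F nums oper i x).2
    (F nums oper (x + 1) j).1 (F nums oper (x + 1) j).2 (oper.getD x "")

def cminF (nums : List Int) (oper : List String) (i j x : Nat) : Int :=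
  minimizeA (F nums oper i x).1 (F nums oper i x).2
    (F nums oper (x + 1) j).1 (F nums oper (x + 1) j).2 (oper.getD x "")

lemma F_base (nums : List Int) (oper : List String) (i j : Nat) (h : j ≤ i) :
    F nums oper i j = (nums.getD i 0, nums.getD i 0) := by
  rw [F]; simp [h]

lemma F_lt (nums : List Int) (oper : List String) (i j : Nat) (h : i < j) :
    F nums oper i j =
      ((List.range' i (j - i)).foldl (fun m x => max m (cmaxF nums oper i j x))
         (cmaxF nums oper i j i),
       (List.range' i (j - i)).foldl (fun m x => min m (cminF nums oper i j x))
         (cminF nums oper i j i)) := by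
  rw [F]
  have h' : ¬ j ≤ i := by omega
  simp only [h', dite_false, cmaxF, cminF]
  rw [List.foldl_attach
    (f := fun (acc : Int × Int) x =>
      (max acc.1 (maximizeA (F nums oper i x).1 (F nums oper i x).2
        (F nums oper (x + 1) j).1 (F nums oper (x + 1) j).2 (oper.getD x "")),
       min acc.2 (minimizeA (F nums oper i x).1 (F nums oper i x).2
        (F nums oper (x + 1) j).1 (F nums oper (x + 1) j).2 (oper.getD x ""))))]
  rw [PySem.List.foldl_prod_mk
    (f := fun m x => max m (maximizeA (F nums oper i x).1 (F nums oper i x).2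
      (F nums oper (x + 1) j).1 (F nums oper (x + 1) j).2 (oper.getD x "")))
    (g := fun m x => min m (minimizeA (F nums oper i x).1 (F nums oper i x).2
      (F nums oper (x + 1) j).1 (F nums oper (x + 1) j).2 (oper.getD x "")))]

-- ---------- A side ----------

-- shape of the two n×n tables
def Shape (n : Nat) (t : List (List Int)) : Prop :=
  t.length = n ∧ ∀ k < n, (t.getD k []).length = n

-- the tables agree with F on every pair admitted by P
def Corr (nums : List Int) (oper : List String) (n : Nat)
    (maxi mini : List (List Int)) (P : Nat → Nat → Prop) : Prop :=
  ∀ i j, i ≤ j → j < n → P i j →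
    tget maxi i j = (F nums oper i j).1 ∧ tget mini i j = (F nums oper i j).2

lemma Corr_mono {nums oper n maxi mini} {P P' : Nat → Nat → Prop}
    (h : ∀ i j, i ≤ j → j < n → P' i j → P i j)
    (hc : Corr nums oper n maxi mini P) : Corr nums oper n maxi mini P' :=
  fun i j hij hj hp => hc i j hij hj (h i j hij hj hp)

lemma tget_tset_same {t : List (List Int)} {i j : Nat} {v : Int}
    (h1 : i < t.length) (h2 : j < (t.getD i []).length) :
    tget (tset t i j v) i j = v := by
  have h2' : j < t[i].length := by
    simpa [List.getD_eq_getElem?_getD, List.getElem?_eq_getElem h1] using h2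
  simp [tget, tset, List.getD_eq_getElem?_getD, List.getElem?_set, h1, h2']

lemma tget_tset_other {t : List (List Int)} {i j i' j' : Nat} {v : Int}
    (h : i ≠ i' ∨ j ≠ j') : tget (tset t i j v) i' j' = tget t i' j' := by
  rcases h with h | h
  · simp [tget, tset, List.getD_eq_getElem?_getD, List.getElem?_set, h]
  · by_cases hi : i = i'
    · rcases hi with rfl
      by_cases hl : i < t.length
      · simp [tget, tset, List.getD_eq_getElem?_getD, List.getElem?_set, hl,
          List.getElem?_set_ne (by omega : j ≠ j')]
      · rw [tset, List.set_eq_of_length_le (by omega)]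
    · simp [tget, tset, List.getD_eq_getElem?_getD, List.getElem?_set, hi]

lemma Shape_tset {n : Nat} {t : List (List Int)} {i j : Nat} {v : Int}
    (hs : Shape n t) : Shape n (tset t i j v) := by
  obtain ⟨hlen, hrow⟩ := hs
  refine ⟨by simp [tset, hlen], fun k hk => ?_⟩
  by_cases hik : i = k
  · rcases hik with rfl
    by_cases hl : i < t.length
    · simp only [tset, List.getD_eq_getElem?_getD, List.getElem?_set_self', hl,
        if_true, Option.getD_some, List.length_set]
      have := hrow i hk
      simpa [List.getD_eq_getElem?_getD, List.getElem?_eq_getElem hl] using this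
    · rw [tset, List.set_eq_of_length_le (by omega)]; exact hrow i hk
  · rw [tset]
    have h2 : (t.set i ((t.getD i []).set j v)).getD k [] = t.getD k [] := by
      simp [List.getD_eq_getElem?_getD, List.getElem?_set, hik]
    rw [h2]; exact hrow k hk

-- get_maxA/get_minA read only strict subintervals; if those agree with F the result is F
lemma getA_eq (nums : List Int) (oper : List String) (i j : Nat)
    (maxi mini : List (List Int)) (hij : i ≤ j)
    (hsub : ∀ i' j', i ≤ i' → i' ≤ j' → j' ≤ j → j' - i' < j - i →
      tget maxi i' j' = (F nums oper i' j').1 ∧ tget mini i' j' = (F nums oper i' j').2) :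
    get_maxA nums oper i j maxi mini = (F nums oper i j).1 ∧
    get_minA nums oper i j maxi mini = (F nums oper i j).2 := by
  by_cases he : i = j
  · rcases he with rfl
    simp [get_maxA, get_minA, F_base nums oper i i (le_refl i)]
  · have hlt : i < j := lt_of_le_of_ne hij he
    have hii := hsub i i (le_refl i) (le_refl i) hij (by omega)
    have hij' := hsub (i + 1) j (by omega) (by omega) (le_refl j) (by omega)
    rw [F_lt nums oper i j hlt]
    simp only [get_maxA, get_minA, if_neg he]
    constructor
    · rw [hii.1, hii.2, hij'.1, hij'.2]
      have hinit : maximizeA (F nums oper i i).1 (F nums oper i i).2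
          (F nums oper (i + 1) j).1 (F nums oper (i + 1) j).2 (oper.getD i "")
          = cmaxF nums oper i j i := rfl
      rw [hinit]
      apply PySem.List.foldl_congr_mem
      intro acc x hx
      have hxb := List.mem_range'_1.mp hx
      have h1 := hsub i x (le_refl i) (by omega) (by omega) (by omega)
      have h2 := hsub (x + 1) j (by omega) (by omega) (le_refl j) (by omega)
      rw [h1.1, h1.2, h2.1, h2.2]
      rfl
    · rw [hii.1, hii.2, hij'.1, hij'.2]
      have hinit : minimizeA (F nums oper i i).1 (F nums oper i i).2
          (F nums oper (i + 1) j).1 (F nums oper (i + 1) j).2 (oper.getD i "")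
          = cminF nums oper i j i := rfl
      rw [hinit]
      apply PySem.List.foldl_congr_mem
      intro acc x hx
      have hxb := List.mem_range'_1.mp hx
      have h1 := hsub i x (le_refl i) (by omega) (by omega) (by omega)
      have h2 := hsub (x + 1) j (by omega) (by omega) (le_refl j) (by omega)
      rw [h1.1, h1.2, h2.1, h2.2]
      rfl

-- one iteration of A's inner loop
def stepA (nums : List Int) (oper : List String) (s : Nat)
    (st : List (List Int) × List (List Int)) (i : Nat) :
    List (List Int) × List (List Int) :=
  let j := i + s
  let maxi' := tset st.1 i j (get_maxA nums oper i j st.1 st.2)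
  let mini' := tset st.2 i j (get_minA nums oper i j maxi' st.2)
  (maxi', mini')

lemma innerA (nums : List Int) (oper : List String) (n s : Nat) (hsn : s < n) :
    ∀ (m a : Nat), a + m ≤ n - s → ∀ (st : List (List Int) × List (List Int)),
      Shape n st.1 → Shape n st.2 →
      Corr nums oper n st.1 st.2 (fun i' j' => j' - i' < s ∨ (j' - i' = s ∧ i' < a)) →
      Shape n ((List.range' a m).foldl (stepA nums oper s) st).1 ∧
      Shape n ((List.range' a m).foldl (stepA nums oper s) st).2 ∧
      Corr nums oper n ((List.range' a m).foldl (stepA nums oper s) st).1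
        ((List.range' a m).foldl (stepA nums oper s) st).2
        (fun i' j' => j' - i' < s ∨ (j' - i' = s ∧ i' < a + m)) := by
  intro m
  induction m with
  | zero =>
    intro a _ st h1 h2 hc
    simp only [List.range', List.foldl_nil]
    exact ⟨h1, h2, Corr_mono (fun i' j' _ _ hp => by simpa using hp) hc⟩
  | succ m ih =>
    intro a ham st h1 h2 hc
    rw [List.range'_succ, List.foldl_cons]
    have han : a + s < n := by omega
    -- the two values written in this iteration are the true F values
    have hsub1 : ∀ i' j', a ≤ i' → i' ≤ j' → j' ≤ a + s → j' - i' < a + s - a →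
        tget st.1 i' j' = (F nums oper i' j').1 ∧ tget st.2 i' j' = (F nums oper i' j').2 := by
      intro i' j' _ hij' hj' hlen
      exact hc i' j' hij' (by omega) (Or.inl (by omega))
    have hga := getA_eq nums oper a (a + s) st.1 st.2 (by omega) hsub1
    have hsub2 : ∀ i' j', a ≤ i' → i' ≤ j' → j' ≤ a + s → j' - i' < a + s - a →
        tget (tset st.1 a (a + s) (get_maxA nums oper a (a + s) st.1 st.2)) i' j'
          = (F nums oper i' j').1 ∧ tget st.2 i' j' = (F nums oper i' j').2 := by
      intro i' j' ha' hij' hj' hlen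
      have hne : a ≠ i' ∨ a + s ≠ j' := by
        by_cases hia : a = i'
        · right; omega
        · left; exact hia
      rw [tget_tset_other hne]
      exact hsub1 i' j' ha' hij' hj' hlen
    have hgb := getA_eq nums oper a (a + s)
      (tset st.1 a (a + s) (get_maxA nums oper a (a + s) st.1 st.2)) st.2 (by omega) hsub2
    -- the state after this iteration
    have hst1 : (stepA nums oper s st a).1
        = tset st.1 a (a + s) (get_maxA nums oper a (a + s) st.1 st.2) := rfl
    have hst2 : (stepA nums oper s st a).2
        = tset st.2 a (a + s) (get_minA nums oper a (a + s)
            (tset st.1 a (a + s) (get_maxA nums oper a (a + s) st.1 st.2)) st.2) := rfl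
    have h1' : Shape n (stepA nums oper s st a).1 := by rw [hst1]; exact Shape_tset h1
    have h2' : Shape n (stepA nums oper s st a).2 := by rw [hst2]; exact Shape_tset h2
    have hc' : Corr nums oper n (stepA nums oper s st a).1 (stepA nums oper s st a).2
        (fun i' j' => j' - i' < s ∨ (j' - i' = s ∧ i' < a + 1)) := by
      intro i' j' hij' hj' hp
      rw [hst1, hst2]
      by_cases hcase : i' = a ∧ j' = a + s
      · rcases hcase with ⟨rfl, rfl⟩
        rw [tget_tset_same (by rw [h1.1]; omega) (by rw [h1.2 i' (by omega)]; omega),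
            tget_tset_same (by rw [h2.1]; omega) (by rw [h2.2 i' (by omega)]; omega)]
        exact ⟨hga.1, hgb.2⟩
      · have hne : a ≠ i' ∨ a + s ≠ j' := by
          by_cases hia : a = i'
          · right; intro hjj; exact hcase ⟨hia.symm, hjj.symm⟩
          · left; exact hia
        rw [tget_tset_other hne, tget_tset_other hne]
        apply hc i' j' hij' hj'
        rcases hp with hp | ⟨hps, hpa⟩
        · exact Or.inl hp
        · refine Or.inr ⟨hps, ?_⟩
          rcases Nat.lt_or_ge i' a with h | h
          · exact h
          · exfalso
            have hia : i' = a := by omega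
            exact hcase ⟨hia, by omega⟩
    have := ih (a + 1) (by omega) (stepA nums oper s st a) h1' h2' hc'
    refine ⟨this.1, this.2.1, Corr_mono (fun i' j' _ _ hp => ?_) this.2.2⟩
    rcases hp with hp | ⟨hps, hpa⟩
    · exact Or.inl hp
    · exact Or.inr ⟨hps, by omega⟩

lemma outerA (nums : List Int) (oper : List String) (n : Nat) :
    ∀ (m a : Nat), a + m ≤ n → ∀ (st : List (List Int) × List (List Int)),
      Shape n st.1 → Shape n st.2 →
      Corr nums oper n st.1 st.2 (fun i' j' => j' - i' < a) →
      Shape n ((List.range' a m).foldl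
        (fun st s => (List.range (n - s)).foldl (stepA nums oper s) st) st).1 ∧
      Shape n ((List.range' a m).foldl
        (fun st s => (List.range (n - s)).foldl (stepA nums oper s) st) st).2 ∧
      Corr nums oper n
        ((List.range' a m).foldl
          (fun st s => (List.range (n - s)).foldl (stepA nums oper s) st) st).1
        ((List.range' a m).foldl
          (fun st s => (List.range (n - s)).foldl (stepA nums oper s) st) st).2
        (fun i' j' => j' - i' < a + m) := by
  intro m
  induction m with
  | zero =>
    intro a _ st h1 h2 hc
    simp only [List.range', List.foldl_nil]
    exact ⟨h1, h2, Corr_mono (fun i' j' _ _ hp => by simpa using hp) hc⟩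
  | succ m ih =>
    intro a ham st h1 h2 hc
    rw [List.range'_succ, List.foldl_cons]
    have hin := innerA nums oper n a (by omega) (n - a) 0 (by omega) st h1 h2
      (Corr_mono (fun i' j' _ _ hp => by
        rcases hp with hp | ⟨_, hp0⟩
        · exact hp
        · omega) hc)
    rw [← List.range_eq_range'] at hin
    have := ih (a + 1) (by omega)
      ((List.range (n - a)).foldl (stepA nums oper a) st) hin.1 hin.2.1
      (Corr_mono (fun i' j' hij' hj' hp => by
        rcases Nat.lt_or_ge (j' - i') a with h | h
        · exact Or.inl h
        · exact Or.inr ⟨by omega, by omega⟩) hin.2.2)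
    refine ⟨this.1, this.2.1, Corr_mono (fun i' j' _ _ hp => by omega) this.2.2⟩

lemma max_arith_eq_F (nums : List Int) (oper : List String) (h : nums ≠ []) :
    max_arith nums oper = (F nums oper 0 (nums.length - 1)).1 := by
  have hne' : 1 ≤ nums.length := List.length_pos_iff.mpr h
  have hrepl : Shape nums.length
      (List.replicate nums.length (List.replicate nums.length (0 : Int))) := by
    refine ⟨by simp, fun k hk => ?_⟩
    simp [List.getD_eq_getElem?_getD, List.getElem?_replicate, hk]
  have hc0 : Corr nums oper nums.length
      (List.replicate nums.length (List.replicate nums.length (0 : Int)))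
      (List.replicate nums.length (List.replicate nums.length (0 : Int)))
      (fun i' j' => j' - i' < 0) := fun i j _ _ hp => absurd hp (by omega)
  have hout := outerA nums oper nums.length nums.length 0 (by omega)
    (List.replicate nums.length (List.replicate nums.length (0 : Int)),
     List.replicate nums.length (List.replicate nums.length (0 : Int))) hrepl hrepl hc0
  rw [← List.range_eq_range'] at hout
  have hfin := (hout.2.2 0 (nums.length - 1) (by omega) (by omega) (by omega)).1
  exact hfin

-- ---------- B side ----------

-- memo invariant: every cached value is the true F value of its interval
def InvM (nums : List Int) (oper : List String)
    (memo : PySem.Dict (Nat × Nat) (Int × Int)) : Prop :=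
  ∀ k v, memo.get? k = some v → k.1 ≤ k.2 ∧ v = F nums oper k.1 k.2

-- the body of Source B's for loop, as a function of the accumulator and the split point
def stepB (nums : List Int) (oper : List String) (i j : Nat)
    (acc : Option Int × Option Int × PySem.Dict (Nat × Nat) (Int × Int)) (x : Nat) :
    Option Int × Option Int × PySem.Dict (Nat × Nat) (Int × Int) :=
  let r1 := solveB nums oper i x acc.2.2
  let r2 := solveB nums oper (x + 1) j r1.2
  let op := oper.getD x ""
  let ca := if op = "+" then r1.1.1 + r2.1.1
            else if op = "-" then r1.1.1 - r2.1.2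
            else r1.1.1 * r2.1.1
  let ci := if op = "+" then r1.1.2 + r2.1.2
            else if op = "-" then r1.1.2 - r2.1.1
            else r1.1.2 * r2.1.2
  let bma := match acc.1 with
             | none => some ca
             | some m => if ca > m then some ca else some m
  let bmi := match acc.2.1 with
             | none => some ci
             | some m => if ci < m then some ci else some m
  (bma, bmi, r2.2)

-- running best as Python keeps it (None = not yet set)
def mstep (cf : Nat → Int) (f : Int → Int → Int) (o : Option Int) (x : Nat) : Option Int :=
  match o with
  | none => some (cf x)
  | some m => some (f m (cf x))

lemma mfold_some (cf : Nat → Int) (f : Int → Int → Int) (l : List Nat) :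
    ∀ a, l.foldl (mstep cf f) (some a) = some (l.foldl (fun m x => f m (cf x)) a) := by
  induction l with
  | nil => intro a; rfl
  | cons x t ih => intro a; simpa [mstep] using ih (f a (cf x))

-- unfolding of solveB's loop as a plain foldl of stepB
lemma solveB_unfold (nums : List Int) (oper : List String) (i j : Nat)
    (memo : PySem.Dict (Nat × Nat) (Int × Int))
    (hget : memo.get? (i, j) = none) (hne : ¬ i = j) :
    solveB nums oper i j memo =
      (let acc := (List.range' i (j - i)).foldl (stepB nums oper i j) (none, none, memo)
       ((acc.1.getD 0, acc.2.1.getD 0),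
        acc.2.2.insert (i, j) (acc.1.getD 0, acc.2.1.getD 0))) := by
  rw [solveB, hget]
  simp only [if_neg hne]
  exact congrArg
    (fun z : Option Int × Option Int × PySem.Dict (Nat × Nat) (Int × Int) =>
      ((z.1.getD 0, z.2.1.getD 0), z.2.2.insert (i, j) (z.1.getD 0, z.2.1.getD 0)))
    (List.foldl_attach (f := stepB nums oper i j))

lemma foldB (nums : List Int) (oper : List String) (i j : Nat)
    (hrec : ∀ i' j', i ≤ i' → i' ≤ j' → j' ≤ j → j' - i' < j - i →
      ∀ memo, InvM nums oper memo →
        (solveB nums oper i' j' memo).1 = F nums oper i' j' ∧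
        InvM nums oper (solveB nums oper i' j' memo).2)
    (hop : ∀ x, i ≤ x → x < j → oper.getD x "" ∈ (["+", "-", "*"] : List String)) :
    ∀ (l : List Nat), (∀ x ∈ l, i ≤ x ∧ x < j) →
      ∀ (oma omi : Option Int) (memo : PySem.Dict (Nat × Nat) (Int × Int)),
        InvM nums oper memo →
        (l.foldl (stepB nums oper i j) (oma, omi, memo)).1
            = l.foldl (mstep (cmaxF nums oper i j) max) oma ∧
        (l.foldl (stepB nums oper i j) (oma, omi, memo)).2.1
            = l.foldl (mstep (cminF nums oper i j) min) omi ∧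
        InvM nums oper (l.foldl (stepB nums oper i j) (oma, omi, memo)).2.2 := by
  intro l
  induction l with
  | nil => intro _ oma omi memo hm; exact ⟨rfl, rfl, hm⟩
  | cons x t iht =>
    intro hl oma omi memo hm
    obtain ⟨hx1, hx2⟩ := hl x (List.mem_cons_self)
    have h1 := hrec i x (le_refl i) hx1 (by omega) (by omega) memo hm
    have h2 := hrec (x + 1) j (by omega) (by omega) (le_refl j) (by omega) _ h1.2
    have hop' := hop x hx1 hx2
    simp only [List.mem_cons, List.not_mem_nil, or_false] at hop'
    have hca : (if oper.getD x "" = "+" then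
          (solveB nums oper i x memo).1.1
            + (solveB nums oper (x + 1) j (solveB nums oper i x memo).2).1.1
        else if oper.getD x "" = "-" then
          (solveB nums oper i x memo).1.1
            - (solveB nums oper (x + 1) j (solveB nums oper i x memo).2).1.2
        else
          (solveB nums oper i x memo).1.1
            * (solveB nums oper (x + 1) j (solveB nums oper i x memo).2).1.1)
        = cmaxF nums oper i j x := by
      rw [h1.1, h2.1]
      rcases hop' with hh | hh | hh <;> (simp only [cmaxF, maximizeA]; rw [hh]; simp)
    have hci : (if oper.getD x "" = "+" then
          (solveB nums oper i x memo).1.2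
            + (solveB nums oper (x + 1) j (solveB nums oper i x memo).2).1.2
        else if oper.getD x "" = "-" then
          (solveB nums oper i x memo).1.2
            - (solveB nums oper (x + 1) j (solveB nums oper i x memo).2).1.1
        else
          (solveB nums oper i x memo).1.2
            * (solveB nums oper (x + 1) j (solveB nums oper i x memo).2).1.2)
        = cminF nums oper i j x := by
      rw [h1.1, h2.1]
      rcases hop' with hh | hh | hh <;> (simp only [cminF, minimizeA]; rw [hh]; simp)
    have hstep : stepB nums oper i j (oma, omi, memo) x =
        (mstep (cmaxF nums oper i j) max oma x, mstep (cminF nums oper i j) min omi x,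
         (solveB nums oper (x + 1) j (solveB nums oper i x memo).2).2) := by
      have hmax' : ∀ m c : Int, (if c > m then some c else some m) = some (max m c) := by
        intro m c
        rcases (by omega : c ≤ m ∨ m < c) with hcm | hcm
        · rw [if_neg (by omega), max_eq_left hcm]
        · rw [if_pos hcm, max_eq_right (le_of_lt hcm)]
      have hmin' : ∀ m c : Int, (if c < m then some c else some m) = some (min m c) := by
        intro m c
        rcases (by omega : m ≤ c ∨ c < m) with hcm | hcm
        · rw [if_neg (by omega), min_eq_left hcm]
        · rw [if_pos hcm, min_eq_right (le_of_lt hcm)]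
      cases oma <;> cases omi <;>
        (simp only [stepB]; rw [hca, hci]; simp only [mstep, hmax', hmin'])
    simp only [List.foldl_cons]
    rw [hstep]
    exact iht (fun y hy => hl y (List.mem_cons_of_mem x hy)) _ _ _ h2.2

lemma InvM_insert {nums oper memo} (hm : InvM nums oper memo) {i j : Nat}
    (hij : i ≤ j) :
    InvM nums oper (memo.insert (i, j) (F nums oper i j)) := by
  intro k v hk
  rw [PySem.Dict.get?_insert] at hk
  split_ifs at hk with hkk
  · rcases hkk with rfl
    cases hk
    exact ⟨hij, rfl⟩
  · exact hm k v hk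

lemma solveB_diag (nums : List Int) (oper : List String) (i : Nat)
    (memo : PySem.Dict (Nat × Nat) (Int × Int)) (hm : InvM nums oper memo) :
    (solveB nums oper i i memo).1 = F nums oper i i ∧
    InvM nums oper (solveB nums oper i i memo).2 := by
  cases hget : memo.get? (i, i) with
  | some v =>
    have hv := hm (i, i) v hget
    rw [solveB, hget]
    exact ⟨hv.2, hm⟩
  | none =>
    rw [solveB, hget]
    simp only [if_pos rfl]
    refine ⟨?_, ?_⟩
    · show (nums.getD i 0, nums.getD i 0) = F nums oper i i
      rw [F_base nums oper i i (le_refl i)]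
    · show InvM nums oper (memo.insert (i, i) (nums.getD i 0, nums.getD i 0))
      have hI := InvM_insert hm (le_refl i)
      rw [F_base nums oper i i (le_refl i)] at hI
      exact hI

lemma solveB_eq (nums : List Int) (oper : List String) :
    ∀ (d i j : Nat), j - i ≤ d → i ≤ j →
      (∀ x, i ≤ x → x < j → oper.getD x "" ∈ (["+", "-", "*"] : List String)) →
      ∀ memo, InvM nums oper memo →
        (solveB nums oper i j memo).1 = F nums oper i j ∧
        InvM nums oper (solveB nums oper i j memo).2 := by
  intro d
  induction d with
  | zero =>
    intro i j hd hij _hop memo hm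
    have hji : j = i := by omega
    rw [hji]
    exact solveB_diag nums oper i memo hm
  | succ d ihd =>
    intro i j hd hij hop memo hm
    by_cases he : i = j
    · rw [← he]
      exact solveB_diag nums oper i memo hm
    · have hlt : i < j := by omega
      cases hget : memo.get? (i, j) with
      | some v =>
        have hv := hm (i, j) v hget
        rw [solveB, hget]
        exact ⟨hv.2, hm⟩
      | none =>
        have hrec : ∀ i' j', i ≤ i' → i' ≤ j' → j' ≤ j → j' - i' < j - i →
            ∀ memo', InvM nums oper memo' →
              (solveB nums oper i' j' memo').1 = F nums oper i' j' ∧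
              InvM nums oper (solveB nums oper i' j' memo').2 := by
          intro i' j' hii' hij' hjj' hlen memo' hm'
          exact ihd i' j' (by omega) hij'
            (fun x hz1 hz2 => hop x (by omega) (by omega)) memo' hm'
        have hfb := foldB nums oper i j hrec hop (List.range' i (j - i))
          (fun x hx => by
            have := List.mem_range'_1.mp hx
            exact ⟨by omega, by omega⟩) none none memo hm
        rw [solveB_unfold nums oper i j memo hget he]
        simp only []
        have hl : List.range' i (j - i) = i :: List.range' (i + 1) (j - i - 1) := by
          have hsp : j - i = (j - i - 1) + 1 := by omega
          conv_lhs => rw [hsp]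
          rw [List.range'_succ]
        have hmax : ((List.range' i (j - i)).foldl (stepB nums oper i j)
            (none, none, memo)).1 = some ((List.range' (i + 1) (j - i - 1)).foldl
              (fun m x => max m (cmaxF nums oper i j x)) (cmaxF nums oper i j i)) := by
          rw [hfb.1, hl, List.foldl_cons]
          show List.foldl _ (some (cmaxF nums oper i j i)) _ = _
          rw [mfold_some]
        have hmin : ((List.range' i (j - i)).foldl (stepB nums oper i j)
            (none, none, memo)).2.1 = some ((List.range' (i + 1) (j - i - 1)).foldl
              (fun m x => min m (cminF nums oper i j x)) (cminF nums oper i j i)) := by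
          rw [hfb.2.1, hl, List.foldl_cons]
          show List.foldl _ (some (cminF nums oper i j i)) _ = _
          rw [mfold_some]
        have hres : (((List.range' i (j - i)).foldl (stepB nums oper i j)
              (none, none, memo)).1.getD 0,
            ((List.range' i (j - i)).foldl (stepB nums oper i j)
              (none, none, memo)).2.1.getD 0) = F nums oper i j := by
          rw [hmax, hmin, F_lt nums oper i j hlt, hl, List.foldl_cons, List.foldl_cons]
          simp [max_self, min_self]
        refine ⟨hres, ?_⟩
        have hI := InvM_insert hfb.2.2 hij
        rw [← hres] at hI
        exact hI
  

lemma max_arith_alt_eq_F (nums : List Int) (oper : List String)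
    (h : nums ≠ [])
    (hops : ∀ x ∈ List.range (nums.length - 1),
      oper.getD x "" ∈ (["+", "-", "*"] : List String)) :
    max_arith_alt nums oper = (F nums oper 0 (nums.length - 1)).1 := by
  have hemp : InvM nums oper PySem.Dict.empty := by
    intro k v hk
    rw [PySem.Dict.get?_empty] at hk
    cases hk
  have hop' : ∀ x, 0 ≤ x → x < nums.length - 1 →
      oper.getD x "" ∈ (["+", "-", "*"] : List String) := by
    intro x _ hx
    exact hops x (List.mem_range.mpr hx)
  have hs := solveB_eq nums oper (nums.length - 1) 0 (nums.length - 1)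
    (by omega) (by omega) hop' PySem.Dict.empty hemp
  exact congrArg Prod.fst hs.1

-- ===== VERDICT (by name: the statement is the Claim_ definition above) =====
theorem max_arith_spec : Claim_equal_max_arith := by
  intro nums oper _hdom hpre
  obtain ⟨hne, hops⟩ := hpre
  unfold Spec_max_arith
  rw [max_arith_eq_F nums oper hne, max_arith_alt_eq_F nums oper hne hops]
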